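-- pv_equiv track=rewrite | github.com/AngheloAlf/puzzle_collection_dwarf | split.py | parse_anonymous_enums
-- ===== SOURCE A (Python) =====
-- KNOWN_ANONYMOUS_ENUMS: dict[str, str] = {
-- }
--
-- def parse_anonymous_enums(contents: list[str]) -> dict[str, str]:
--     current_enum_name: str|None = None
--     current_enum_contents: list[str] = []
--     enums_by_contents: dict[str, str] = {}
--     for line in contents:
--         if current_enum_name is not None:
--             if "}" in line:
--                 body = "".join(current_enum_contents)
--                 if body not in enums_by_contents:
--                     name = current_enum_name
--                     name = KNOWN_ANONYMOUS_ENUMS.get(name, name)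
--                     enums_by_contents[body] = name
--                 current_enum_name = None
--                 current_enum_contents.clear()
--                 continue
--             current_enum_contents.append(line.strip())
--         else:
--             if "enum /* @" not in line:
--                 continue
--             current_enum_name = line.split("enum /* ")[1].split(" */ {")[0]
--
--     return enums_by_contents
-- ===== SOURCE B (Python) =====
-- KNOWN_ANONYMOUS_ENUMS: dict[str, str] = {
-- }
--
-- def parse_anonymous_enums(contents: list[str]) -> dict[str, str]:
--     enums_by_contents: dict[str, str] = {}
--     n = len(contents)
--     i = 0
--     while i < n:
--         line = contents[i]
--         if "enum /* @" not in line: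
--             i += 1
--             continue
--         name = line.split("enum /* ")[1].split(" */ {")[0]
--         body_parts: list[str] = []
--         j = i + 1
--         while j < n and "}" not in contents[j]:
--             body_parts.append(contents[j].strip())
--             j += 1
--         if j >= n:
--             # enum never closed: nothing more can be added
--             break
--         body = "".join(body_parts)
--         if body not in enums_by_contents:
--             enums_by_contents[body] = KNOWN_ANONYMOUS_ENUMS.get(name, name)
--         i = j + 1
--     return enums_by_contents
-- ===== Notes on version B (the rewrite author's own statement) =====
-- stated objective: alternative
-- what changed: Replaced the flag-based state machine threading (current_enum_name, current_enum_contents) through one loop over every line with an index-driven nested scan: an outer while finds each enum header and an inner while collects the stripped body lines up to the closing '}', storing the joined body only when the close was found.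
import Mathlib
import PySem

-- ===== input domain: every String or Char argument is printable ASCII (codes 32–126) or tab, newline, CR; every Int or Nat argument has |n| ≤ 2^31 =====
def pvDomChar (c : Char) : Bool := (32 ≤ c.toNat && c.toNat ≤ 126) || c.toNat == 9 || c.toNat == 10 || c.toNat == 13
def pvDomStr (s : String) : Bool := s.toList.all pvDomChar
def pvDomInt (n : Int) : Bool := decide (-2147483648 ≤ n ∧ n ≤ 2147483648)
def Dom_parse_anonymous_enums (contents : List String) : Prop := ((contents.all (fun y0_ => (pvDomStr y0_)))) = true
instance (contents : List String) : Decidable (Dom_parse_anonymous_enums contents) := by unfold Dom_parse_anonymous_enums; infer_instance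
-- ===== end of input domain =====

-- B replaces A's flag-based state machine with an index-driven nested scan (outer loop finds
-- enum headers, inner loop collects the body up to '}'); alternative decomposition, same cost.

-- ===== PORT A =====

-- KNOWN_ANONYMOUS_ENUMS = {} (the module constant, empty in the source)
def pvKnownAnonymousEnums : PySem.Dict String String := PySem.Dict.empty

-- line.split("enum /* ")[1].split(" */ {")[0]; both callers guard with '"enum /* @" in line',
-- so the split has a second piece (the .getD defaults are never consulted).
def pvEnumName (line : String) : String :=
  let parts := (PySem.Str.split? line "enum /* ").getD []
  let tail := (PySem.List.pyGet? parts 1).getD ""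
  (((PySem.Str.split? tail " */ {").getD []).headD "")

-- the body of A's for-loop, on state (current_enum_name, current_enum_contents, enums_by_contents)
def pvStepA (st : Option String × List String × PySem.Dict String String) (line : String) :
    Option String × List String × PySem.Dict String String :=
  match st with
  | (some name, cur, d) =>
    if PySem.Str.isIn "}" line then
      let body := PySem.Str.join "" cur
      let d' := if d.contains body then d
        else d.insert body (pvKnownAnonymousEnums.getD name name)
      (none, [], d')
    else (some name, cur ++ [PySem.Str.strip line], d)
  | (none, cur, d) =>
    if PySem.Str.isIn "enum /* @" line then (some (pvEnumName line), cur, d)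
    else (none, cur, d)

def parse_anonymous_enums (contents : List String) : List (String × String) :=
  (contents.foldl pvStepA (none, [], PySem.Dict.empty)).2.2.items

-- ===== PORT B =====

-- inner while: from index j, collect stripped lines until a line containing '}';
-- some (body_parts, j) with contents[j] the closing line, none if it ran off the end.
-- fuel is only a structural totality guard: callers pass fuel ≥ contents.length - j,
-- so the 0-arm is never the reason a none comes back.
def pvScanBody (contents : List String) (fuel : Nat) (j : Nat) (acc : List String) :
    Option (List String × Nat) :=
  match fuel with
  | 0 => none
  | f + 1 =>
    if h : j < contents.length then
      if PySem.Str.isIn "}" contents[j] then some (acc, j)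
      else pvScanBody contents f (j + 1) (acc ++ [PySem.Str.strip contents[j]])
    else none

-- outer while over header indices (fuel again only the totality guard: i strictly grows)
def pvScanEnums (contents : List String) (fuel : Nat) (i : Nat) (d : PySem.Dict String String) :
    PySem.Dict String String :=
  match fuel with
  | 0 => d
  | f + 1 =>
    if h : i < contents.length then
      if PySem.Str.isIn "enum /* @" contents[i] then
        match pvScanBody contents (contents.length - (i + 1)) (i + 1) [] with
        | some (parts, j) =>
          let body := PySem.Str.join "" parts
          let name := pvEnumName contents[i]
          let d' := if d.contains body then d
            else d.insert body (pvKnownAnonymousEnums.getD name name)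
          pvScanEnums contents f (j + 1) d'
        | none => d
      else pvScanEnums contents f (i + 1) d
    else d

def parse_anonymous_enums_alt (contents : List String) : List (String × String) :=
  (pvScanEnums contents contents.length 0 PySem.Dict.empty).items

-- ===== PRECONDITION & SPEC =====
def Spec_parse_anonymous_enums (contents : List String) (out : List (String × String)) : Prop := out = parse_anonymous_enums_alt contents
instance (contents : List String) (out : List (String × String)) : Decidable (Spec_parse_anonymous_enums contents out) := by unfold Spec_parse_anonymous_enums; infer_instance

-- ===== CLAIM (what is proved, stated in full; the proofs are below) =====
def Claim_equal_parse_anonymous_enums : Prop := ∀ (contents : List String), Dom_parse_anonymous_enums contents → Spec_parse_anonymous_enums contents (parse_anonymous_enums contents)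

-- ===== LEMMAS AND PROOFS =====

-- with the start index past the end, the inner scan finds nothing whatever the fuel
theorem pvScanBody_of_ge (contents : List String) (fuel j : Nat) (acc : List String)
    (h : contents.length ≤ j) : pvScanBody contents fuel j acc = none := by
  cases fuel with
  | zero => rfl
  | succ f => rw [pvScanBody, dif_neg (by omega)]

-- with the start index past the end, the outer scan returns the dict whatever the fuel
theorem pvScanEnums_of_ge (contents : List String) (fuel i : Nat) (d : PySem.Dict String String)
    (h : contents.length ≤ i) : pvScanEnums contents fuel i d = d := by
  cases fuel with
  | zero => rfl
  | succ f => rw [pvScanEnums, dif_neg (by omega)]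

-- the two loop invariants, by strong induction on a common bound k on the remaining length:
-- (P) B's outer scan from i (any adequate fuel) equals A's fold over the suffix from i with no enum open;
-- (Q) A's fold over the suffix from j with enum (name, acc) open equals the match on B's inner scan.
theorem pvMain (contents : List String) (k : Nat) :
    (∀ fuel i, contents.length - i ≤ k → contents.length - i ≤ fuel → ∀ d,
      pvScanEnums contents fuel i d = ((contents.drop i).foldl pvStepA (none, [], d)).2.2)
    ∧ (∀ g f' j, contents.length - j ≤ k → contents.length - j ≤ g →
        contents.length ≤ j + 1 + f' → ∀ name acc d,
      ((contents.drop j).foldl pvStepA (some name, acc, d)).2.2 =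
        match pvScanBody contents g j acc with
        | some (parts, j') =>
            pvScanEnums contents f' (j' + 1)
              (if d.contains (PySem.Str.join "" parts) then d
               else d.insert (PySem.Str.join "" parts) (pvKnownAnonymousEnums.getD name name))
        | none => d) := by
  induction k using Nat.strong_induction_on with
  | _ k ih =>
    constructor
    · intro fuel i hi hfuel d
      by_cases h : i < contents.length
      · have hk : 0 < k := by omega
        obtain ⟨f, rfl⟩ : ∃ f, fuel = f + 1 := ⟨fuel - 1, by omega⟩
        rw [pvScanEnums, dif_pos h, List.drop_eq_getElem_cons h, List.foldl_cons]
        by_cases he : PySem.Str.isIn "enum /* @" contents[i]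
        · have hstep : pvStepA (none, [], d) contents[i]
              = (some (pvEnumName contents[i]), [], d) := by
            simp only [pvStepA]; rw [if_pos he]
          rw [if_pos he, hstep,
            (ih (k - 1) (by omega)).2 (contents.length - (i + 1)) f (i + 1)
              (by omega) (by omega) (by omega) (pvEnumName contents[i]) [] d]
        · have hstep : pvStepA (none, [], d) contents[i] = (none, [], d) := by
            simp only [pvStepA]; rw [if_neg he]
          rw [if_neg he, hstep,
            (ih (k - 1) (by omega)).1 f (i + 1) (by omega) (by omega) d]
      · rw [pvScanEnums_of_ge contents _ _ d (by omega),
          List.drop_eq_nil_of_le (by omega), List.foldl_nil]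
    · intro g f' j hj hg hf' name acc d
      by_cases h : j < contents.length
      · have hk : 0 < k := by omega
        obtain ⟨g', rfl⟩ : ∃ g'', g = g'' + 1 := ⟨g - 1, by omega⟩
        rw [List.drop_eq_getElem_cons h, List.foldl_cons, pvScanBody, dif_pos h]
        by_cases hb : PySem.Str.isIn "}" contents[j]
        · have hstep : pvStepA (some name, acc, d) contents[j]
              = (none, [],
                 if d.contains (PySem.Str.join "" acc) then d
                 else d.insert (PySem.Str.join "" acc) (pvKnownAnonymousEnums.getD name name)) := by
            simp only [pvStepA]; rw [if_pos hb]
          rw [if_pos hb, hstep]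
          exact ((ih (k - 1) (by omega)).1 f' (j + 1) (by omega) (by omega) _).symm
        · have hstep : pvStepA (some name, acc, d) contents[j]
              = (some name, acc ++ [PySem.Str.strip contents[j]], d) := by
            simp only [pvStepA]; rw [if_neg hb]
          rw [if_neg hb, hstep]
          exact (ih (k - 1) (by omega)).2 g' f' (j + 1) (by omega) (by omega) (by omega)
            name (acc ++ [PySem.Str.strip contents[j]]) d
      · rw [pvScanBody_of_ge contents _ _ acc (by omega),
          List.drop_eq_nil_of_le (by omega), List.foldl_nil]

-- ===== VERDICT (by name: the statement is the Claim_ definition above) =====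
theorem parse_anonymous_enums_spec : Claim_equal_parse_anonymous_enums := by
  intro contents _
  unfold Spec_parse_anonymous_enums parse_anonymous_enums parse_anonymous_enums_alt
  rw [(pvMain contents contents.length).1 contents.length 0 (by omega) (by omega)
    PySem.Dict.empty, List.drop_zero]
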